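-- pv_equiv track=rewrite | github.com/RealDave11/Speech-Synthesis-Code | Greedy_Algorithm.py | get_triphoned_lines
-- ===== SOURCE A (Python) =====
-- def get_triphoned_lines(phone_lines):
--
--     triphones_lines = []
--
--     for line in phone_lines:
--         line_triphones = []
--         for index, phone in enumerate(line):
--             if index > 0:
--                 preceding_phone_index = index - 1
--                 preceding_phone = line[preceding_phone_index]
--             else:
--                 preceding_phone = "sil"
--             if index < (len(line) - 1):
--                 following_phone_index = index + 1
--                 following_phone = line[following_phone_index]
--             else:
--                 following_phone = "sil"
--             phone_triphone = preceding_phone + "_" + phone + "_" + following_phone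
--             line_triphones.append(phone_triphone)
--
--         triphones_lines.append(line_triphones)
--
--     return triphones_lines
-- ===== SOURCE B (Python) =====
-- def get_triphoned_lines(phone_lines):
--     def go(prev, rest):
--         # structural recursion carrying the preceding phone; no indices, no padding
--         if not rest:
--             return []
--         if len(rest) == 1:
--             return [prev + "_" + rest[0] + "_" + "sil"]
--         return [prev + "_" + rest[0] + "_" + rest[1]] + go(rest[0], rest[1:])
--     return [go("sil", line) for line in phone_lines]
-- ===== Notes on version B (the rewrite author's own statement) =====
-- stated objective: alternative
-- what changed: Replaces A's indexed loop with boundary conditionals and neighbour lookups by a structural recursion over each line that pattern-matches two elements at a time and carries the preceding phone as an accumulator (no indices, no length tests, no padded copy).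
import Mathlib
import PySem

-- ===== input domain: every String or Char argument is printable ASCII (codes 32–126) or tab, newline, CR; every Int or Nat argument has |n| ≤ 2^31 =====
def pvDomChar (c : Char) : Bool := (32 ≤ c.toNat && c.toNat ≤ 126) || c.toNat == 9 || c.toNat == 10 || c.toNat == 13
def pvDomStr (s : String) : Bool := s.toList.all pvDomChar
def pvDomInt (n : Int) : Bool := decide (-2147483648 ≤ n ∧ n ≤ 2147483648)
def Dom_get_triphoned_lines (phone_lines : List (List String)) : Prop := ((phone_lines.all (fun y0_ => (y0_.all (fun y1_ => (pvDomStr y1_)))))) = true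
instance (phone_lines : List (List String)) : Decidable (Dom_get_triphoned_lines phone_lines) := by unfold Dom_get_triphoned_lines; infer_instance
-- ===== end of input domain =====

-- B replaces A's indexed loop (boundary conditionals + neighbour index lookups) by a
-- structural recursion over each line carrying the preceding phone; objective: alternative.

-- ===== PORT A =====
-- inner loop over enumerate(line); the neighbour lookups line[index-1]/line[index+1]
-- are only evaluated under guards that keep the index in range, so pyGet? is always
-- some there and the .getD "" default is unreachable.
def pvLineTriA (line : List String) : List String :=
  (PySem.List.enumerate line 0).foldl
    (fun line_triphones ip =>
      let index := ip.1
      let phone := ip.2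
      let preceding_phone :=
        if index > 0 then (PySem.List.pyGet? line (index - 1)).getD "" else "sil"
      let following_phone :=
        if index < (line.length : Int) - 1 then (PySem.List.pyGet? line (index + 1)).getD "" else "sil"
      line_triphones ++ [preceding_phone ++ "_" ++ phone ++ "_" ++ following_phone])
    []

def get_triphoned_lines (phone_lines : List (List String)) : List (List String) :=
  phone_lines.foldl (fun acc line => acc ++ [pvLineTriA line]) []

-- ===== PORT B =====
-- go(prev, rest): recursion on rest, matching two elements at a time
def pvGo (prev : String) : List String → List String
  | [] => []
  | [x] => [prev ++ "_" ++ x ++ "_" ++ "sil"]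
  | x :: y :: rest => (prev ++ "_" ++ x ++ "_" ++ y) :: pvGo x (y :: rest)

def get_triphoned_lines_alt (phone_lines : List (List String)) : List (List String) :=
  phone_lines.map (pvGo "sil")

-- ===== PRECONDITION & SPEC =====
def Spec_get_triphoned_lines (phone_lines : List (List String)) (out : List (List String)) : Prop := out = get_triphoned_lines_alt phone_lines
instance (phone_lines : List (List String)) (out : List (List String)) : Decidable (Spec_get_triphoned_lines phone_lines out) := by unfold Spec_get_triphoned_lines; infer_instance

-- ===== CLAIM (what is proved, stated in full; the proofs are below) =====
def Claim_equal_get_triphoned_lines : Prop := ∀ (phone_lines : List (List String)), Dom_get_triphoned_lines phone_lines → Spec_get_triphoned_lines phone_lines (get_triphoned_lines phone_lines)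

-- ===== LEMMAS AND PROOFS =====

-- the body A folds over enumerate, as a plain function
def pvTriF (line : List String) (ip : Int × String) : String :=
  (if ip.1 > 0 then (PySem.List.pyGet? line (ip.1 - 1)).getD "" else "sil")
  ++ "_" ++ ip.2 ++ "_" ++
  (if ip.1 < (line.length : Int) - 1 then (PySem.List.pyGet? line (ip.1 + 1)).getD "" else "sil")

-- key invariant: mapping pvTriF over the enumeration of a suffix (starting at the
-- suffix's offset) equals B's recursion over that suffix, with the element just
-- before the suffix (or "sil") as the carried preceding phone.
theorem pv_key (rest : List String) : ∀ (pre : List String) (prev : String),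
    ("sil" :: (pre ++ rest))[pre.length]? = some prev →
    (PySem.List.enumerate rest (pre.length : Int)).map (pvTriF (pre ++ rest))
      = pvGo prev rest := by
  induction rest with
  | nil =>
    intro pre prev _
    simp [PySem.List.enumerate, pvGo]
  | cons r rest' ih =>
    intro pre prev hprev
    rw [PySem.List.enumerate_cons, List.map_cons]
    -- the left neighbour emitted at this position is prev
    have hpre : (if ((pre.length : Int)) > 0 then
        (PySem.List.pyGet? (pre ++ r :: rest') ((pre.length : Int) - 1)).getD "" else "sil") = prev := by
      cases pre with
      | nil => simp at hprev ⊢; exact hprev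
      | cons p ps =>
        have hk : ((p :: ps).length : Int) > 0 := by
          exact_mod_cast Nat.succ_pos ps.length
        rw [if_pos hk]
        have hc : ((p :: ps).length : Int) - 1 = ((ps.length : Nat) : Int) := by
          push_cast [List.length_cons]; ring
        rw [hc, PySem.List.pyGet?_natCast]
        simp at hprev
        simp [hprev]
    -- the IH hypothesis for the next position
    have hnext : ("sil" :: ((pre ++ [r]) ++ rest'))[(pre ++ [r]).length]? = some r := by
      simp
    have ihr := ih (pre ++ [r]) r hnext
    rw [List.append_assoc] at ihr
    simp only [List.singleton_append] at ihr
    have hlen1 : (((pre ++ [r]).length : Nat) : Int) = (pre.length : Int) + 1 := by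
      simp
    rw [hlen1] at ihr
    cases rest' with
    | nil =>
      simp only [PySem.List.enumerate, List.map]
      show [pvTriF (pre ++ [r]) ((pre.length : Int), r)] = pvGo prev [r]
      simp only [pvGo]
      congr 1
      unfold pvTriF
      simp only [hpre]
      simp
    | cons r2 rest'' =>
      rw [ihr]
      simp only [pvGo]
      congr 1
      unfold pvTriF
      simp only [hpre]
      have hlt : (pre.length : Int) < ((pre ++ r :: r2 :: rest'').length : Int) - 1 := by
        simp
        omega
      rw [if_pos hlt]
      have hc : (pre.length : Int) + 1 = (((pre.length + 1 : Nat)) : Int) := by push_cast; ring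
      rw [hc, PySem.List.pyGet?_natCast]
      simp

theorem pvLine_eq (line : List String) : pvLineTriA line = pvGo "sil" line := by
  have h0 : ("sil" :: (([] : List String) ++ line))[([] : List String).length]? = some "sil" := by simp
  have := pv_key line [] "sil" h0
  simp only [List.nil_append, List.length_nil, Nat.cast_zero] at this
  show (PySem.List.enumerate line 0).foldl (fun acc ip => acc ++ [pvTriF line ip]) [] = _
  rw [PySem.List.foldl_append_singleton_eq_map (f := pvTriF line)]
  rw [List.nil_append]
  exact this

-- ===== VERDICT (by name: the statement is the Claim_ definition above) =====
theorem get_triphoned_lines_spec : Claim_equal_get_triphoned_lines := by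
  intro phone_lines _
  unfold Spec_get_triphoned_lines get_triphoned_lines get_triphoned_lines_alt
  rw [PySem.List.foldl_append_singleton_eq_map (f := pvLineTriA)]
  simp only [List.nil_append]
  exact List.map_congr_left (fun l _ => pvLine_eq l)
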